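-- pv_equiv track=rewrite | github.com/wanniethecharacter/Millionaire | millonaire.py.py | calculate_quiz_table_size
-- ===== SOURCE A (Python) =====
-- def calculate_quiz_table_size(question_lines, list_of_answers):
--     max_question_length = 0
--     answer_lengths = []
--     for question_ in question_lines:
--         if len(question_) > max_question_length:
--             max_question_length = len(question_)
--     for answer in list_of_answers:
--         for element in answer:
--             if element != answer[0]:
--                 answer_lengths.append(len(element))
--                 answer_lengths.sort()
--     if answer_lengths[-1]*2 > max_question_length:
--         table_line_length = answer_lengths[-1]*2
--     else:
--         table_line_length = max_question_length
--
--     return table_line_length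
-- ===== SOURCE B (Python) =====
-- def calculate_quiz_table_size(question_lines, list_of_answers):
--     max_question_length = max(map(len, question_lines), default=0)
--     max_answer_length = max(
--         len(element)
--         for answer in list_of_answers
--         for element in answer
--         if element != answer[0]
--     )
--     return max(2 * max_answer_length, max_question_length)
-- ===== Notes on version B (the rewrite author's own statement) =====
-- stated objective: faster
-- what changed: Replaces the list of answer lengths that A re-sorts after every append (and indexes at -1) with a single running max computed by one generator pass through the qualifying answer elements, and the hand-rolled question-length loop with max(map(len, ...), default=0).
import Mathlib
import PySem

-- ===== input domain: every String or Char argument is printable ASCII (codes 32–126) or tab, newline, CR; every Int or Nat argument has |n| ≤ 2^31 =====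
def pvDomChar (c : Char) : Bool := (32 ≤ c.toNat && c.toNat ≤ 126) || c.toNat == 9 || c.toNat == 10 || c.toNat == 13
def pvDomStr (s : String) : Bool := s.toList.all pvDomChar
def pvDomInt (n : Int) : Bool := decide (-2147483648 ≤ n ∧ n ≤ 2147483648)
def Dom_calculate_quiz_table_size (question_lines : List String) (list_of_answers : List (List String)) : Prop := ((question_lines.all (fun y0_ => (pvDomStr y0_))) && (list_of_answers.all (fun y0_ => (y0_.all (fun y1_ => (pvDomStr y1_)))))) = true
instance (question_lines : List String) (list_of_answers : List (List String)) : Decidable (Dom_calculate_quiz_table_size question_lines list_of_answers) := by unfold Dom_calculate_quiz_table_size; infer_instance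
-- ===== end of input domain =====

-- B replaces A's re-sorted length list with a single running-max pass (measured faster); A raises on inputs with no qualifying answer element, excluded by Pre_.


-- ===== PORT A =====
-- literal port: running max of question lengths; append + .sort() after each qualifying element;
-- answer[0] is only evaluated when the inner loop runs (answer nonempty), so pyGetD answer 0 "" is exact there;
-- answer_lengths[-1] is pyGetD _ (-1) 0, exact under Pre_ (nonempty; Python raises IndexError otherwise).
def calculate_quiz_table_size (question_lines : List String) (list_of_answers : List (List String)) : Int :=
  let max_question_length : Int := question_lines.foldl
    (fun m question_ => if PySem.Str.len question_ > m then PySem.Str.len question_ else m) 0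
  let answer_lengths : List Int := list_of_answers.foldl
    (fun acc answer => answer.foldl
      (fun acc2 element =>
        if element ≠ PySem.List.pyGetD answer 0 "" then
          PySem.List.sorted (acc2 ++ [PySem.Str.len element]) (fun x => x)
        else acc2) acc) []
  if PySem.List.pyGetD answer_lengths (-1) 0 * 2 > max_question_length then
    PySem.List.pyGetD answer_lengths (-1) 0 * 2
  else
    max_question_length

-- ===== PORT B =====
-- Source B: max(map(len, question_lines), default=0); one generator pass collecting qualifying lengths,
-- Python's max of it (nonempty under Pre_; ValueError otherwise) as maxD with default 0.
def calculate_quiz_table_size_alt (question_lines : List String) (list_of_answers : List (List String)) : Int :=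
  let max_question_length : Int :=
    PySem.List.maxD (question_lines.map (fun q => PySem.Str.len q)) (fun x => x) 0
  let max_answer_length : Int :=
    PySem.List.maxD
      (list_of_answers.flatMap (fun answer =>
        (answer.filter (fun element => element ≠ PySem.List.pyGetD answer 0 "")).map
          (fun element => PySem.Str.len element)))
      (fun x => x) 0
  max (2 * max_answer_length) max_question_length

-- ===== PRECONDITION & SPEC =====
-- Pre_ excludes exactly the inputs on which A raises (IndexError on answer_lengths[-1]): no answer
-- contains an element different from that answer's first element; B raises there too (ValueError from max()).
def Pre_calculate_quiz_table_size (question_lines : List String) (list_of_answers : List (List String)) : Prop :=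
  ∃ answer ∈ list_of_answers, ∃ element ∈ answer, element ≠ PySem.List.pyGetD answer 0 ""
instance (question_lines : List String) (list_of_answers : List (List String)) : Decidable (Pre_calculate_quiz_table_size question_lines list_of_answers) := by unfold Pre_calculate_quiz_table_size; infer_instance

def pvWitness_calculate_quiz_table_size : List String × List (List String) := (["ab"], [["x", "yz"]])

def Spec_calculate_quiz_table_size (question_lines : List String) (list_of_answers : List (List String)) (out : Int) : Prop := out = calculate_quiz_table_size_alt question_lines list_of_answers
instance (question_lines : List String) (list_of_answers : List (List String)) (out : Int) : Decidable (Spec_calculate_quiz_table_size question_lines list_of_answers out) := by unfold Spec_calculate_quiz_table_size; infer_instance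

-- ===== CLAIM (what is proved, stated in full; the proofs are below) =====
def Claim_equal_calculate_quiz_table_size : Prop := ∀ (question_lines : List String) (list_of_answers : List (List String)), Dom_calculate_quiz_table_size question_lines list_of_answers → Pre_calculate_quiz_table_size question_lines list_of_answers → Spec_calculate_quiz_table_size question_lines list_of_answers (calculate_quiz_table_size question_lines list_of_answers)

-- ===== LEMMAS AND PROOFS =====

-- per-answer qualifying lengths, as B builds them
def pvQual (answer : List String) : List Int :=
  (answer.filter (fun element => element ≠ PySem.List.pyGetD answer 0 "")).map
    (fun element => PySem.Str.len element)

lemma pv_sorted_congr_perm (xs ys : List Int) (h : xs.Perm ys) :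
    PySem.List.sorted xs (fun x => x) = PySem.List.sorted ys (fun x => x) := by
  apply PySem.List.sorted_id_eq_of_perm_of_pairwise
  · exact (PySem.List.sorted_perm ys (fun x => x) false).trans h.symm
  · exact PySem.List.sorted_pairwise ys (fun x => x)

-- A's question loop = B's maxD over the mapped lengths
lemma pv_maxq (question_lines : List String) :
    question_lines.foldl
      (fun m question_ => if PySem.Str.len question_ > m then PySem.Str.len question_ else m) 0
    = PySem.List.maxD (question_lines.map (fun q => PySem.Str.len q)) (fun x => x) 0 := by
  have hmax : (fun (m x : Int) => if x > m then x else m) = max := by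
    funext m x; simp only [max_def]; split_ifs <;> omega
  cases question_lines with
  | nil => rfl
  | cons q t =>
      have h0 : (0 : Int) ≤ PySem.Str.len q := by
        simp [PySem.Str.len_eq]
      simp only [List.foldl_cons, List.map_cons, PySem.List.maxD, PySem.List.max?_id_cons,
        Option.getD_some]
      have : (if PySem.Str.len q > 0 then PySem.Str.len q else (0 : Int)) = PySem.Str.len q := by
        split_ifs <;> omega
      rw [this]
      rw [show (fun (m : Int) (question_ : String) =>
            if PySem.Str.len question_ > m then PySem.Str.len question_ else m)
          = (fun m question_ => max m (PySem.Str.len question_)) by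
        funext m s; simp only [max_def]; split_ifs <;> omega]
      rw [List.foldl_map]

-- inner loop over one answer: append-and-sort each qualifying element = sort of acc ++ qualifying lengths
lemma pv_inner (f : String) (l : List String) (acc : List Int) (hacc : acc.Pairwise (· ≤ ·)) :
    l.foldl (fun acc2 element =>
        if element ≠ f then PySem.List.sorted (acc2 ++ [PySem.Str.len element]) (fun x => x)
        else acc2) acc
    = PySem.List.sorted
        (acc ++ (l.filter (fun element => element ≠ f)).map (fun element => PySem.Str.len element))
        (fun x => x) := by
  induction l generalizing acc with
  | nil =>
      simp only [List.foldl_nil, List.filter_nil, List.map_nil, List.append_nil]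
      exact (PySem.List.sorted_eq_self_of_pairwise acc (fun x => x) hacc).symm
  | cons e t ih =>
      by_cases he : e ≠ f
      · have hd : decide (e ≠ f) = true := by simpa using he
        simp only [List.foldl_cons, if_pos he, List.filter_cons, hd, if_true, List.map_cons]
        rw [ih _ (PySem.List.sorted_pairwise (acc ++ [PySem.Str.len e]) (fun x => x))]
        apply pv_sorted_congr_perm
        refine ((PySem.List.sorted_perm (acc ++ [PySem.Str.len e]) (fun x => x) false).append_right
          ((t.filter (fun element => element ≠ f)).map (fun element => PySem.Str.len element))).trans ?_
        exact List.Perm.of_eq (by simp)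
      · have hd : decide (e ≠ f) = false := by simpa using he
        simp only [List.foldl_cons, if_neg he, List.filter_cons, hd, Bool.false_eq_true, if_false]
        exact ih acc hacc

-- outer loop: A's answer_lengths = sorted flatMap of qualifying lengths
lemma pv_outer (las : List (List String)) (acc : List Int) (hacc : acc.Pairwise (· ≤ ·)) :
    las.foldl
      (fun acc answer => answer.foldl
        (fun acc2 element =>
          if element ≠ PySem.List.pyGetD answer 0 "" then
            PySem.List.sorted (acc2 ++ [PySem.Str.len element]) (fun x => x)
          else acc2) acc) acc
    = PySem.List.sorted (acc ++ las.flatMap pvQual) (fun x => x) := by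
  induction las generalizing acc with
  | nil =>
      simp only [List.foldl_nil, List.flatMap_nil, List.append_nil]
      exact (PySem.List.sorted_eq_self_of_pairwise acc (fun x => x) hacc).symm
  | cons a t ih =>
      simp only [List.foldl_cons, List.flatMap_cons]
      rw [pv_inner (PySem.List.pyGetD a 0 "") a acc hacc]
      rw [ih _ (PySem.List.sorted_pairwise _ (fun x => x))]
      apply pv_sorted_congr_perm
      refine ((PySem.List.sorted_perm (acc ++ pvQual a) (fun x => x) false).append_right
        (t.flatMap pvQual)).trans ?_
      exact List.Perm.of_eq (by simp)

-- last element of a ≤-sorted list bounds every element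
lemma pv_getLast_isMax (l : List Int) (h : l ≠ []) (hs : l.Pairwise (· ≤ ·)) :
    ∀ x ∈ l, x ≤ l.getLast h := by
  induction l with
  | nil => simp at h
  | cons a t ih =>
      intro x hx
      cases t with
      | nil => simp at hx; simp [hx]
      | cons b u =>
          rcases List.mem_cons.1 hx with rfl | hx'
          · have hb : x ≤ b := (List.pairwise_cons.1 hs).1 b (by simp)
            have := ih (by simp) (List.pairwise_cons.1 hs).2 b (by simp)
            rw [List.getLast_cons (by simp)]
            omega
          · have := ih (by simp) (List.pairwise_cons.1 hs).2 x hx'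
            rw [List.getLast_cons (by simp)]
            exact this

-- last of the sorted qualifying list = B's maxD over it
lemma pv_last_eq_maxD (q : List Int) (hq : q ≠ [])
    (hsne : PySem.List.sorted q (fun x => x) ≠ []) :
    (PySem.List.sorted q (fun x => x)).getLast hsne = PySem.List.maxD q (fun x => x) 0 := by
  obtain ⟨m, hm⟩ : ∃ m, PySem.List.max? q (fun x => x) = some m := by
    cases h : PySem.List.max? q (fun x => x) with
    | none => exact absurd ((PySem.List.max?_eq_none_iff q (fun x => x)).1 h) hq
    | some m => exact ⟨m, rfl⟩
  have hmq : m ∈ q := PySem.List.max?_mem hm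
  have hmax : ∀ y ∈ q, y ≤ m := PySem.List.max?_isMax hm
  have hgl_mem : (PySem.List.sorted q (fun x => x)).getLast hsne ∈ q :=
    (PySem.List.mem_sorted q (fun x => x) false _).1 (List.getLast_mem hsne)
  have h1 : (PySem.List.sorted q (fun x => x)).getLast hsne ≤ m := hmax _ hgl_mem
  have h2 : m ≤ (PySem.List.sorted q (fun x => x)).getLast hsne :=
    pv_getLast_isMax _ hsne (PySem.List.sorted_pairwise q (fun x => x)) m
      ((PySem.List.mem_sorted q (fun x => x) false m).2 hmq)
  simp only [PySem.List.maxD, hm, Option.getD_some]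
  omega

-- ===== VERDICT (by name: the statement is the Claim_ definition above) =====
theorem calculate_quiz_table_size_spec : Claim_equal_calculate_quiz_table_size := by
  intro question_lines list_of_answers _ hpre
  unfold Spec_calculate_quiz_table_size calculate_quiz_table_size calculate_quiz_table_size_alt
  obtain ⟨answer, hans, element, helt, hne⟩ := hpre
  have hQne : list_of_answers.flatMap pvQual ≠ [] := by
    have : PySem.Str.len element ∈ list_of_answers.flatMap pvQual := by
      refine List.mem_flatMap.2 ⟨answer, hans, ?_⟩
      exact List.mem_map.2 ⟨element, List.mem_filter.2 ⟨helt, by simpa using hne⟩, rfl⟩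
    intro h; rw [h] at this; simp at this
  have hsne : PySem.List.sorted (list_of_answers.flatMap pvQual) (fun x => x) ≠ [] := by
    intro h
    have hp := PySem.List.sorted_perm (list_of_answers.flatMap pvQual) (fun x => x) false
    rw [h] at hp
    exact hQne hp.symm.eq_nil
  rw [pv_outer list_of_answers [] (by simp)]
  simp only [List.nil_append]
  rw [PySem.List.pyGetD_neg_one _ _ hsne, pv_last_eq_maxD _ hQne hsne]
  rw [pv_maxq question_lines]
  unfold pvQual
  rw [max_def]
  split_ifs <;> omega
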